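-- pv_equiv track=rewrite | github.com/jaison-joseph/projecteuler | 1-50/30.py | nice
-- ===== SOURCE A (Python) =====
-- def nice(num):
-- 	copy = num
-- 	foo = 0
-- 	while (num>0):
-- 		foo = foo + (num%10)**5
-- 		num = num // 10
-- 		if (foo > copy):
-- 			return False
-- 	if (copy == foo):
-- 		return True
-- 	else:
-- 		return False
-- ===== SOURCE B (Python) =====
-- def nice(num):
--     if num < 0:
--         return False
--     return sum(int(d)**5 for d in str(num)) == num
-- ===== Notes on version B (the rewrite author's own statement) =====
-- stated objective: idiomatic
-- what changed: B computes the fifth-power digit sum from the characters of str(num) in one comprehension and compares once, instead of A's while-loop of modulo-and-floor-division digit peeling with an early-exit overflow check.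
import Mathlib
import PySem

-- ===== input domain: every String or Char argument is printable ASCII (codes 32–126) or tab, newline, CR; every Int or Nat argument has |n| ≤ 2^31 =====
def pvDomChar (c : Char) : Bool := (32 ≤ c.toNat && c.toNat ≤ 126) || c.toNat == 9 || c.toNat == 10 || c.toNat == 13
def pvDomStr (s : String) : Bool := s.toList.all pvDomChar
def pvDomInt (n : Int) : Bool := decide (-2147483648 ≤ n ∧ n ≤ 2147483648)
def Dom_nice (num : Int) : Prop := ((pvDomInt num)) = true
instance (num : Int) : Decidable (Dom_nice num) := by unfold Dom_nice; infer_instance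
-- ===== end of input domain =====

-- B replaces A's modulo-and-floor-division digit-peeling loop (with early exit) by one pass over the
-- characters of str(num) (guarding num < 0), summing int(d)**5 and comparing once: idiomatic.

-- termination helper for the while-loop recursion (cited by decreasing_by below)
theorem pvFloordiv10_lt (num : Int) (h : 0 < num) :
    (PySem.Int.floordiv num 10).toNat < num.toNat := by
  have h1 : PySem.Int.floordiv num 10 = num / 10 :=
    PySem.Int.floordiv_eq_ediv_of_pos (by omega)
  omega

-- ===== PORT A =====
-- the while-loop: state (num, foo), copy fixed
def niceGo (copy num foo : Int) : Bool :=
  if h : num > 0 then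
    let foo' := foo + (PySem.Int.mod num 10) ^ 5
    let num' := PySem.Int.floordiv num 10
    if foo' > copy then false
    else niceGo copy num' foo'
  else
    if copy = foo then true else false
termination_by num.toNat
decreasing_by exact pvFloordiv10_lt num h

def nice (num : Int) : Bool := niceGo num num 0

-- ===== PORT B =====
def nice_alt (num : Int) : Bool :=
  if num < 0 then false
  else
    decide ((((PySem.Int.toStr num).toList).map
      (fun d => ((PySem.Int.ofChars? [d]).getD 0) ^ 5)).sum = num)

-- ===== PRECONDITION & SPEC =====
def Spec_nice (num : Int) (out : Bool) : Prop := out = nice_alt num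
instance (num : Int) (out : Bool) : Decidable (Spec_nice num out) := by unfold Spec_nice; infer_instance

-- ===== CLAIM (what is proved, stated in full; the proofs are below) =====
def Claim_equal_nice : Prop := ∀ (num : Int), Dom_nice num → Spec_nice num (nice num)

-- ===== LEMMAS AND PROOFS =====

-- the fifth-power digit sum, written with A's primitives
def pvDsum (num : Int) : Int :=
  if h : num > 0 then pvDsum (PySem.Int.floordiv num 10) + (PySem.Int.mod num 10) ^ 5
  else 0
termination_by num.toNat
decreasing_by exact pvFloordiv10_lt num h

theorem pvDsum_nonneg (num : Int) : 0 ≤ pvDsum num := by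
  induction num using pvDsum.induct with
  | case1 num h ih =>
    rw [pvDsum]; simp only [h, dite_true]
    have := PySem.Int.mod_nonneg num (b := 10) (by omega)
    positivity
  | case2 num h => rw [pvDsum]; simp [h]

-- the loop computes: false early-exits don't change the final comparison
theorem niceGo_eq (copy num foo : Int) (hf : 0 ≤ foo) :
    niceGo copy num foo = decide (copy = foo + pvDsum num) := by
  induction num using pvDsum.induct generalizing foo with
  | case1 num h ih =>
    rw [niceGo, pvDsum]
    simp only [h, dite_true]
    have hm : 0 ≤ (PySem.Int.mod num 10) ^ 5 := by
      have := PySem.Int.mod_nonneg num (b := 10) (by omega); positivity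
    have hdv : PySem.Int.floordiv num 10 = num / 10 :=
      PySem.Int.floordiv_eq_ediv_of_pos (by omega)
    have hmd : PySem.Int.mod num 10 = num % 10 :=
      PySem.Int.mod_eq_emod_of_pos (by omega)
    by_cases he : foo + (PySem.Int.mod num 10) ^ 5 > copy
    · simp only [he, if_true]
      have hd := pvDsum_nonneg (PySem.Int.floordiv num 10)
      have hne : copy ≠ foo + (pvDsum (PySem.Int.floordiv num 10) + PySem.Int.mod num 10 ^ 5) := by
        omega
      rw [hdv, hmd] at hne
      simp [hne]
    · simp only [he, if_false]
      rw [ih (foo + (PySem.Int.mod num 10) ^ 5) (by omega)]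
      have harr : foo + PySem.Int.mod num 10 ^ 5 + pvDsum (PySem.Int.floordiv num 10)
          = foo + (pvDsum (PySem.Int.floordiv num 10) + PySem.Int.mod num 10 ^ 5) := by ring
      rw [harr]
  | case2 num h =>
    rw [niceGo, pvDsum]
    simp only [h, dite_false]
    by_cases hc : copy = foo <;> simp [hc]

-- value of a single digit character under int(·)
theorem pvDigitChar_val (d : Nat) (hd : d < 10) :
    (PySem.Int.ofChars? [Nat.digitChar d]).getD 0 = (d : Int) := by
  interval_cases d <;> decide

-- B's digit-string sum equals the digit-peeling sum
theorem pvToDigits_sum (n : Nat) :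
    (((Nat.toDigits 10 n).map
      (fun d => ((PySem.Int.ofChars? [d]).getD 0) ^ 5)).sum) = pvDsum (n : Int) := by
  induction n using Nat.strong_induction_on with
  | _ n ih =>
    rw [Nat.toDigits_eq_if (by omega)]
    by_cases hn : n < 10
    · simp only [hn, if_true, List.map_cons, List.map_nil, List.sum_cons, List.sum_nil]
      rw [pvDigitChar_val n hn]
      by_cases h0 : n = 0
      · subst h0; rw [pvDsum]; norm_num
      · rw [pvDsum]
        have hpos : (n : Int) > 0 := by omega
        simp only [hpos, dite_true]
        rw [show ((10 : Int)) = ((10 : Nat) : Int) by norm_num,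
          PySem.Int.floordiv_natCast, PySem.Int.mod_natCast]
        rw [show n / 10 = 0 by omega]
        rw [pvDsum]
        simp only [show ¬ (((0:Nat):Int) > 0) by simp, dite_false]
        rw [show n % 10 = n by omega]
        ring
    · simp only [hn, if_false, List.map_append, List.sum_append, List.map_cons,
        List.map_nil, List.sum_cons, List.sum_nil]
      rw [ih (n / 10) (by omega), pvDigitChar_val (n % 10) (by omega)]
      conv_rhs => rw [pvDsum]
      have hpos : (n : Int) > 0 := by omega
      simp only [hpos, dite_true]
      rw [show ((10 : Int)) = ((10 : Nat) : Int) by norm_num,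
        PySem.Int.floordiv_natCast, PySem.Int.mod_natCast]
      ring

-- ===== VERDICT (by name: the statement is the Claim_ definition above) =====
theorem nice_spec : Claim_equal_nice := by
  intro num _
  unfold Spec_nice nice nice_alt
  rw [niceGo_eq num num 0 le_rfl, zero_add]
  by_cases hneg : num < 0
  · rw [if_pos hneg]
    have h0 : pvDsum num = 0 := by rw [pvDsum]; exact dif_neg (by omega)
    rw [h0]
    exact decide_eq_false (by omega)
  · rw [if_neg hneg]
    rw [PySem.Int.toList_toStr]
    unfold PySem.Int.toChars
    rw [if_neg hneg]
    have : num.toNat = num := by omega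
    rw [pvToDigits_sum num.toNat, this]
    simp [eq_comm]
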